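-- pv_equiv track=rewrite | github.com/DevonPorcher/hearth-analysis | h_manacsv.py | process_mana
-- ===== SOURCE A (Python) =====
-- def process_mana(mana_spent_list):
--     floated_mana_05 = 0
--     floated_mana_10 = 0
--     floated_mana = 0
--
--     for index, mana_used in enumerate(mana_spent_list):
--         mana_available = min(index+1, 10)
--         floated_mana_turn = mana_available - mana_used
--         # print 'index: ' + str(index)
--         # print 'mana available: ' + str(mana_available)
--         # print 'mana used: ' + str(mana_used)
--         # print 'mana floated: ' + str(floated_mana_turn)
--
--         floated_mana += floated_mana_turn
--         if index < 5:
--             floated_mana_05 += floated_mana_turn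
--         if index < 10:
--             floated_mana_10 += floated_mana_turn
--
--     return floated_mana_05, floated_mana_10, floated_mana
-- ===== SOURCE B (Python) =====
-- def process_mana(mana_spent_list):
--     # Closed form: total available mana over k uncapped turns is the triangular
--     # number k*(k+1)//2; past turn 10 each turn contributes a flat 10.
--     n = len(mana_spent_list)
--     k5 = min(n, 5)
--     k10 = min(n, 10)
--     tri10 = k10 * (k10 + 1) // 2
--     floated_mana_05 = k5 * (k5 + 1) // 2 - sum(mana_spent_list[:5])
--     floated_mana_10 = tri10 - sum(mana_spent_list[:10])
--     floated_mana = tri10 + 10 * max(n - 10, 0) - sum(mana_spent_list)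
--     return floated_mana_05, floated_mana_10, floated_mana
-- ===== Notes on version B (the rewrite author's own statement) =====
-- stated objective: faster
-- what changed: Replaces the per-element accumulation of available mana by a closed form: available-mana totals become triangular numbers k*(k+1)//2 plus a flat 10 per turn past ten, so only plain sums of the spent values are computed (no per-index min, no per-element weights, no conditionals in a loop).
import Mathlib
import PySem

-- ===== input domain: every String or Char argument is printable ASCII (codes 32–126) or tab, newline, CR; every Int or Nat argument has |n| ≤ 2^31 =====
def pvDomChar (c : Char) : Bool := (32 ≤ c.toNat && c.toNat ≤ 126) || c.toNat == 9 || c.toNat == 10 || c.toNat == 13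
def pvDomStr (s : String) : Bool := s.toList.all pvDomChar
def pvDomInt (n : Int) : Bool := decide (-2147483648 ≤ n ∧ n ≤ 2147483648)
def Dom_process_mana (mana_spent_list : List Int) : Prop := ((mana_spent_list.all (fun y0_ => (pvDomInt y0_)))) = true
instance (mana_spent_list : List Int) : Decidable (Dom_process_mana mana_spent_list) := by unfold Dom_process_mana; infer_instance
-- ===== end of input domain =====

-- B replaces A's per-element accumulation by a closed form: available mana over k turns is the
-- triangular number k*(k+1)//2 (flat 10 per turn past ten), so only plain sums of the spent
-- values remain; a timing run is what decides any speed label.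

-- ===== PORT A =====
def process_mana (mana_spent_list : List Int) : Int × Int × Int :=
  (PySem.List.enumerate mana_spent_list 0).foldl
    (fun (s : Int × Int × Int) (p : Int × Int) =>
      let mana_available := min (p.1 + 1) 10
      let floated_mana_turn := mana_available - p.2
      let floated_mana := s.2.2 + floated_mana_turn
      let floated_mana_05 := if p.1 < 5 then s.1 + floated_mana_turn else s.1
      let floated_mana_10 := if p.1 < 10 then s.2.1 + floated_mana_turn else s.2.1
      (floated_mana_05, floated_mana_10, floated_mana))
    (0, 0, 0)

-- ===== PORT B =====
def process_mana_alt (mana_spent_list : List Int) : Int × Int × Int :=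
  let n : Int := mana_spent_list.length
  let k5 := min n 5
  let k10 := min n 10
  let tri10 := PySem.Int.floordiv (k10 * (k10 + 1)) 2
  let floated_mana_05 :=
    PySem.Int.floordiv (k5 * (k5 + 1)) 2 - (PySem.List.slice mana_spent_list none (some 5)).sum
  let floated_mana_10 := tri10 - (PySem.List.slice mana_spent_list none (some 10)).sum
  let floated_mana := tri10 + 10 * max (n - 10) 0 - mana_spent_list.sum
  (floated_mana_05, floated_mana_10, floated_mana)

-- ===== PRECONDITION & SPEC =====
def Spec_process_mana (mana_spent_list : List Int) (out : Int × Int × Int) : Prop := out = process_mana_alt mana_spent_list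
instance (mana_spent_list : List Int) (out : Int × Int × Int) : Decidable (Spec_process_mana mana_spent_list out) := by unfold Spec_process_mana; infer_instance

-- ===== CLAIM =====
def Claim_equal_process_mana : Prop := ∀ (mana_spent_list : List Int), Dom_process_mana mana_spent_list → Spec_process_mana mana_spent_list (process_mana mana_spent_list)

-- ===== LEMMAS AND PROOFS =====

/-- Indexed weighted sum: `sumW w k [m0,m1,…] = w k m0 + w (k+1) m1 + …`. -/
def sumW (w : Int → Int → Int) : Int → List Int → Int
  | _, [] => 0
  | k, m :: t => w k m + sumW w (k + 1) t

def w5 (i m : Int) : Int := if i < 5 then min (i + 1) 10 - m else 0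
def w10 (i m : Int) : Int := if i < 10 then min (i + 1) 10 - m else 0
def wT (i m : Int) : Int := min (i + 1) 10 - m

theorem foldA (xs : List Int) : ∀ (k a b c : Int),
    (PySem.List.enumerate xs k).foldl
      (fun (s : Int × Int × Int) (p : Int × Int) =>
        let mana_available := min (p.1 + 1) 10
        let floated_mana_turn := mana_available - p.2
        let floated_mana := s.2.2 + floated_mana_turn
        let floated_mana_05 := if p.1 < 5 then s.1 + floated_mana_turn else s.1
        let floated_mana_10 := if p.1 < 10 then s.2.1 + floated_mana_turn else s.2.1
        (floated_mana_05, floated_mana_10, floated_mana))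
      (a, b, c)
    = (a + sumW w5 k xs, b + sumW w10 k xs, c + sumW wT k xs) := by
  induction xs with
  | nil => intro k a b c; simp [PySem.List.enumerate_nil, sumW]
  | cons m t ih =>
      intro k a b c
      rw [PySem.List.enumerate_cons, List.foldl_cons, ih]
      simp only [sumW, w5, w10, wT]
      split_ifs <;> refine Prod.ext ?_ (Prod.ext ?_ ?_) <;> simp <;> ring

theorem sumW_append (w : Int → Int → Int) (u : List Int) : ∀ (v : List Int) (k : Int),
    sumW w k (u ++ v) = sumW w k u + sumW w (k + u.length) v := by
  induction u with
  | nil => intro v k; simp [sumW]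
  | cons m t ih =>
      intro v k
      simp only [List.cons_append, sumW, ih, List.length_cons]
      push_cast; ring_nf

theorem sumW_w5_big (xs : List Int) : ∀ (k : Int), 5 ≤ k → sumW w5 k xs = 0 := by
  induction xs with
  | nil => intro k _; rfl
  | cons m t ih =>
      intro k hk
      simp only [sumW, w5, if_neg (by omega : ¬ k < 5)]
      rw [ih (k + 1) (by omega)]; ring

theorem sumW_w5_small (xs : List Int) : ∀ (k : Int), 0 ≤ k → k + xs.length ≤ 5 →
    sumW w5 k xs = sumW (fun i m => i + 1 - m) k xs := by
  induction xs with
  | nil => intro k _ _; rfl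
  | cons m t ih =>
      intro k h0 h5
      simp only [List.length_cons] at h5
      have h5' : (k : Int) + t.length ≤ 4 := by push_cast at h5 ⊢; omega
      simp only [sumW, w5, if_pos (by omega : k < 5),
        min_eq_left (by omega : k + 1 ≤ 10)]
      rw [ih (k + 1) (by omega) (by omega)]

theorem sumW_w10_big (xs : List Int) : ∀ (k : Int), 10 ≤ k → sumW w10 k xs = 0 := by
  induction xs with
  | nil => intro k _; rfl
  | cons m t ih =>
      intro k hk
      simp only [sumW, w10, if_neg (by omega : ¬ k < 10)]
      rw [ih (k + 1) (by omega)]; ring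

theorem sumW_w10_small (xs : List Int) : ∀ (k : Int), 0 ≤ k → k + xs.length ≤ 10 →
    sumW w10 k xs = sumW (fun i m => i + 1 - m) k xs := by
  induction xs with
  | nil => intro k _ _; rfl
  | cons m t ih =>
      intro k h0 h10
      simp only [List.length_cons] at h10
      have h10' : (k : Int) + t.length ≤ 9 := by push_cast at h10 ⊢; omega
      simp only [sumW, w10, if_pos (by omega : k < 10),
        min_eq_left (by omega : k + 1 ≤ 10)]
      rw [ih (k + 1) (by omega) (by omega)]

theorem sumW_wT_small (xs : List Int) : ∀ (k : Int), 0 ≤ k → k + xs.length ≤ 10 →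
    sumW wT k xs = sumW (fun i m => i + 1 - m) k xs := by
  induction xs with
  | nil => intro k _ _; rfl
  | cons m t ih =>
      intro k h0 h10
      simp only [List.length_cons] at h10
      have h10' : (k : Int) + t.length ≤ 9 := by push_cast at h10 ⊢; omega
      simp only [sumW, wT, min_eq_left (by omega : k + 1 ≤ 10)]
      rw [ih (k + 1) (by omega) (by omega)]

theorem sumW_wT_tail (xs : List Int) : ∀ (k : Int), 10 ≤ k →
    sumW wT k xs = 10 * xs.length - xs.sum := by
  induction xs with
  | nil => intro k _; simp [sumW]
  | cons m t ih =>
      intro k hk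
      simp only [sumW, wT, min_eq_right (by omega : (10 : Int) ≤ k + 1),
        List.length_cons, List.sum_cons]
      rw [ih (k + 1) (by omega)]; push_cast; ring

/-- Twice the uncapped linear sum, in closed form. -/
theorem sumW_lin (xs : List Int) : ∀ (k : Int),
    2 * sumW (fun i m => i + 1 - m) k xs
      = xs.length * (2 * k + xs.length + 1) - 2 * xs.sum := by
  induction xs with
  | nil => intro k; simp [sumW]
  | cons m t ih =>
      intro k
      simp only [sumW, List.length_cons, List.sum_cons]
      have := ih (k + 1)
      push_cast at this ⊢
      linarith [this]

/-- The triangular-number floordiv minus the list sum equals the uncapped linear sum. -/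
theorem tri_sub (xs : List Int) :
    PySem.Int.floordiv ((xs.length : Int) * ((xs.length : Int) + 1)) 2 - xs.sum
      = sumW (fun i m => i + 1 - m) 0 xs := by
  have h := sumW_lin xs 0
  have hfd : PySem.Int.floordiv ((xs.length : Int) * ((xs.length : Int) + 1)) 2
      = sumW (fun i m => i + 1 - m) 0 xs + xs.sum := by
    rw [PySem.Int.floordiv_eq_iff_of_pos (by norm_num)]
    constructor <;> nlinarith [h]
  omega

-- ===== VERDICT =====
theorem process_mana_spec : Claim_equal_process_mana := by
  intro xs _
  unfold Spec_process_mana process_mana process_mana_alt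
  rw [foldA]
  simp only [zero_add]
  rw [show (5 : Int) = ((5 : Nat) : Int) by norm_num,
      show (10 : Int) = ((10 : Nat) : Int) by norm_num,
      PySem.List.slice_to_natCast, PySem.List.slice_to_natCast]
  simp only [Nat.cast_ofNat, Prod.mk.injEq]
  have hsplit : ∀ (w : Int → Int → Int) (j : Nat), j ≤ xs.length → sumW w 0 xs
      = sumW w 0 (xs.take j) + sumW w ((j : Int)) (xs.drop j) := by
    intro w j hj
    conv_lhs => rw [← List.take_append_drop j xs]
    rw [sumW_append]
    congr 2
    simp [List.length_take, Nat.min_eq_left hj]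
  refine ⟨?_, ?_, ?_⟩
  · -- floated_mana_05
    by_cases h1 : xs.length ≤ 5
    · rw [min_eq_left (by exact_mod_cast h1 : ((xs.length : Int) ≤ 5)),
        List.take_of_length_le h1, sumW_w5_small xs 0 le_rfl (by omega), ← tri_sub]
    · have hl : (xs.take 5).length = 5 := by rw [List.length_take]; omega
      rw [min_eq_right (by exact_mod_cast (by omega : 5 ≤ xs.length) : ((5 : Int) ≤ (xs.length : Int))),
        hsplit w5 5 (by omega)]
      push_cast
      rw [sumW_w5_big _ 5 (by norm_num), add_zero,
        sumW_w5_small _ 0 le_rfl (by rw [hl]; norm_num)]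
      have ht := tri_sub (xs.take 5)
      rw [hl] at ht
      push_cast at ht
      linarith [ht]
  · -- floated_mana_10
    by_cases h2 : xs.length ≤ 10
    · rw [min_eq_left (by exact_mod_cast h2 : ((xs.length : Int) ≤ 10)),
        List.take_of_length_le h2, sumW_w10_small xs 0 le_rfl (by omega), ← tri_sub]
    · have hl : (xs.take 10).length = 10 := by rw [List.length_take]; omega
      rw [min_eq_right (by exact_mod_cast (by omega : 10 ≤ xs.length) : ((10 : Int) ≤ (xs.length : Int))),
        hsplit w10 10 (by omega)]
      push_cast
      rw [sumW_w10_big _ 10 (by norm_num), add_zero,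
        sumW_w10_small _ 0 le_rfl (by rw [hl]; norm_num)]
      have ht := tri_sub (xs.take 10)
      rw [hl] at ht
      push_cast at ht
      linarith [ht]
  · -- floated_mana
    by_cases h2 : xs.length ≤ 10
    · rw [min_eq_left (by exact_mod_cast h2 : ((xs.length : Int) ≤ 10)),
        max_eq_right (by omega : ((xs.length : Int) - 10) ≤ 0),
        sumW_wT_small xs 0 le_rfl (by omega), ← tri_sub]
      ring
    · have hl : (xs.take 10).length = 10 := by rw [List.length_take]; omega
      have hsum : (xs.take 10).sum + (xs.drop 10).sum = xs.sum := by
        rw [← List.sum_append, List.take_append_drop]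
      have hdl : ((xs.drop 10).length : Int) = (xs.length : Int) - 10 := by
        rw [List.length_drop]; omega
      rw [min_eq_right (by exact_mod_cast (by omega : 10 ≤ xs.length) : ((10 : Int) ≤ (xs.length : Int))),
        max_eq_left (by omega : (0 : Int) ≤ (xs.length : Int) - 10),
        hsplit wT 10 (by omega)]
      push_cast
      rw [sumW_wT_small _ 0 le_rfl (by rw [hl]; norm_num),
        sumW_wT_tail _ 10 (by norm_num), hdl]
      have ht := tri_sub (xs.take 10)
      rw [hl] at ht
      push_cast at ht
      linarith [ht, hsum]
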